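-- pv_equiv track=rewrite | github.com/jiannazzone/Advent-of-Code | Day03/main.py | deliverPresents2
-- ===== SOURCE A (Python) =====
-- def deliverPresents2(data):
--     # Houses will be stored as a dictionary: "x,y":numPresents
--     visitedHouses = { "0,0": 1 }
--     isSanta = True
--
--     # Track our locations
--     santaX = 0
--     santaY = 0
--     roboX = 0
--     roboY = 0
--
--     # Loop through the commands.
--     # If the house is new, add it to visitedHouses
--     # If the house already exists, add another present
--     for step in data:
--         # Process the step
--         if isSanta:
--             if step == "^":
--                 santaY += 1
--             elif step == "v":
--                 santaY -= 1
--             elif step == ">":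
--                 santaX += 1
--             elif step == "<":
--                 santaX -= 1
--         else:
--             if step == "^":
--                 roboY += 1
--             elif step == "v":
--                 roboY -= 1
--             elif step == ">":
--                 roboX += 1
--             elif step == "<":
--                 roboX -= 1
--
--         # Check to see if the house exists in the dictionary
--         if isSanta:
--             if f'{santaX},{santaY}' in visitedHouses.keys():
--                 visitedHouses[f'{santaX},{santaY}'] += 1
--             else:
--                 visitedHouses[f'{santaX},{santaY}'] = 1
--         else:
--             if f'{roboX},{roboY}' in visitedHouses.keys():
--                 visitedHouses[f'{roboX},{roboY}'] += 1
--             else: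
--                 visitedHouses[f'{roboX},{roboY}'] = 1
--
--         # Toggle who is moving
--         isSanta = not isSanta
--
--     return visitedHouses
-- ===== SOURCE B (Python) =====
-- def deliverPresents2(data):
--     # Two independent paths: santa walks data[0::2], robo walks data[1::2].
--     DELTAS = {'^': (0, 1), 'v': (0, -1), '>': (1, 0), '<': (-1, 0)}
--
--     def walk(steps):
--         x = y = 0
--         keys = []
--         for c in steps:
--             dx, dy = DELTAS.get(c, (0, 0))
--             x += dx
--             y += dy
--             keys.append(f'{x},{y}')
--         return keys
--
--     santa_keys = walk(data[0::2])
--     robo_keys = walk(data[1::2])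
--
--     counts = {'0,0': 1}
--     for a, b in zip(santa_keys, robo_keys):
--         counts[a] = counts.get(a, 0) + 1
--         counts[b] = counts.get(b, 0) + 1
--     if len(robo_keys) < len(santa_keys):
--         k = santa_keys[-1]
--         counts[k] = counts.get(k, 0) + 1
--     return counts
-- ===== Notes on version B (the rewrite author's own statement) =====
-- stated objective: alternative
-- what changed: A's single loop toggling an isSanta flag over five mutable variables is replaced by two independent path walks over data[0::2] and data[1::2] using a delta map, followed by one counter pass over the zipped key streams.
import Mathlib
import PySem

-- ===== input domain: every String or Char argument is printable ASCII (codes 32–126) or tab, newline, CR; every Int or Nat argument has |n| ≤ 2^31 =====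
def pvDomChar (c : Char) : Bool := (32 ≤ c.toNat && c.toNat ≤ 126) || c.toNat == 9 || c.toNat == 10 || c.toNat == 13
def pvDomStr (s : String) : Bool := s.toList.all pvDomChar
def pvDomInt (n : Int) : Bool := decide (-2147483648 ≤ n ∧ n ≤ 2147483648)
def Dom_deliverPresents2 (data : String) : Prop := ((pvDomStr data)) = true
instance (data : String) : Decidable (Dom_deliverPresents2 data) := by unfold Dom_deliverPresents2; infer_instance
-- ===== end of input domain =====

-- B replaces A's toggle-flag interleaved walk by two independent path walks (data[0::2] / data[1::2])
-- with a delta map and a counter pass over the collected keys; objective: alternative decomposition.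


-- ===== PORT A =====
-- A's loop body: state (isSanta, santaX, santaY, roboX, roboY, visitedHouses)
def pvStepA (st : Bool × Int × Int × Int × Int × PySem.Dict String Int) (step : Char) :
    Bool × Int × Int × Int × Int × PySem.Dict String Int :=
  let isSanta := st.1
  let sx := st.2.1; let sy := st.2.2.1; let rx := st.2.2.2.1; let ry := st.2.2.2.2.1
  let d := st.2.2.2.2.2
  if isSanta then
    let pos := if step = '^' then (sx, sy + 1) else if step = 'v' then (sx, sy - 1)
      else if step = '>' then (sx + 1, sy) else if step = '<' then (sx - 1, sy) else (sx, sy)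
    let k := PySem.Int.toStr pos.1 ++ "," ++ PySem.Int.toStr pos.2
    let d := if d.contains k then d.insert k (d.getD k 0 + 1) else d.insert k 1
    (false, pos.1, pos.2, rx, ry, d)
  else
    let pos := if step = '^' then (rx, ry + 1) else if step = 'v' then (rx, ry - 1)
      else if step = '>' then (rx + 1, ry) else if step = '<' then (rx - 1, ry) else (rx, ry)
    let k := PySem.Int.toStr pos.1 ++ "," ++ PySem.Int.toStr pos.2
    let d := if d.contains k then d.insert k (d.getD k 0 + 1) else d.insert k 1
    (true, sx, sy, pos.1, pos.2, d)

def deliverPresents2 (data : String) : List (String × Int) :=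
  let fin := data.toList.foldl pvStepA (true, 0, 0, 0, 0, PySem.Dict.ofList [("0,0", 1)])
  fin.2.2.2.2.2.items

-- ===== PORT B =====
def pvDeltas : PySem.Dict Char (Int × Int) :=
  PySem.Dict.ofList [('^', (0, 1)), ('v', (0, -1)), ('>', (1, 0)), ('<', (-1, 0))]

-- Source B walk's loop body: state (x, y, keys)
def pvStepB (st : Int × Int × List String) (c : Char) : Int × Int × List String :=
  let dxy := pvDeltas.getD c (0, 0)
  let x := st.1 + dxy.1
  let y := st.2.1 + dxy.2
  (x, y, st.2.2 ++ [PySem.Int.toStr x ++ "," ++ PySem.Int.toStr y])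

def pvWalkB (steps : String) : List String :=
  (steps.toList.foldl pvStepB (0, 0, [])).2.2

-- Source B's zip-loop body: two counter updates
def pvCountPair (d : PySem.Dict String Int) (p : String × String) : PySem.Dict String Int :=
  let d := d.insert p.1 (d.getD p.1 0 + 1)
  d.insert p.2 (d.getD p.2 0 + 1)

def deliverPresents2_alt (data : String) : List (String × Int) :=
  let santaKeys := pvWalkB (match PySem.Str.slice? data (some 0) none 2 with
    | some s => s | none => "")
  let roboKeys := pvWalkB (match PySem.Str.slice? data (some 1) none 2 with
    | some s => s | none => "")
  let counts := PySem.Dict.ofList [("0,0", (1 : Int))]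
  let counts := (santaKeys.zip roboKeys).foldl pvCountPair counts
  let counts := if roboKeys.length < santaKeys.length then
      match PySem.List.pyGet? santaKeys (-1) with
      | some k => counts.insert k (counts.getD k 0 + 1)
      | none => counts
    else counts
  counts.items

-- ===== PRECONDITION & SPEC =====
def Spec_deliverPresents2 (data : String) (out : List (String × Int)) : Prop := out = deliverPresents2_alt data
instance (data : String) (out : List (String × Int)) : Decidable (Spec_deliverPresents2 data out) := by unfold Spec_deliverPresents2; infer_instance

-- ===== CLAIM (what is proved, stated in full; the proofs are below) =====
def Claim_equal_deliverPresents2 : Prop := ∀ (data : String), Dom_deliverPresents2 data → Spec_deliverPresents2 data (deliverPresents2 data)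

-- ===== LEMMAS AND PROOFS =====

-- proof vocabulary: a single step's move, a position's key, one counter update
def pvMove (p : Int × Int) (c : Char) : Int × Int :=
  if c = '^' then (p.1, p.2 + 1) else if c = 'v' then (p.1, p.2 - 1)
  else if c = '>' then (p.1 + 1, p.2) else if c = '<' then (p.1 - 1, p.2) else p

def pvKey (p : Int × Int) : String := PySem.Int.toStr p.1 ++ "," ++ PySem.Int.toStr p.2

def pvUpd (d : PySem.Dict String Int) (k : String) : PySem.Dict String Int :=
  d.insert k (d.getD k 0 + 1)

-- the interleaved key stream of A's loop: first mover at p, other mover at q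
def pvG : List Char → Int × Int → Int × Int → List String
  | [], _, _ => []
  | c :: cs, p, q => let p' := pvMove p c; pvKey p' :: pvG cs q p'

def pvEvens {α : Type} : List α → List α
  | [] => []
  | [x] => [x]
  | x :: _ :: rest => x :: pvEvens rest

def pvIlv {α : Type} : List α → List α → List α
  | [], bs => bs
  | a :: as, [] => a :: as
  | a :: as, b :: bs => a :: b :: pvIlv as bs

def pvWalkFrom (p : Int × Int) : List Char → List String
  | [] => []
  | c :: cs => let p' := pvMove p c; pvKey p' :: pvWalkFrom p' cs

theorem pvEvens_cons {α : Type} (c : α) (cs : List α) :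
    pvEvens (c :: cs) = c :: pvEvens cs.tail := by
  cases cs <;> rfl

theorem pvUpdA_eq (d : PySem.Dict String Int) (k : String) :
    (if d.contains k then d.insert k (d.getD k 0 + 1) else d.insert k 1) = pvUpd d k := by
  unfold pvUpd
  by_cases h : d.contains k = true
  · simp [h]
  · have h0 : d.get? k = none := by
      rw [PySem.Dict.get?_eq_none_iff_contains]; simpa using h
    simp [h, PySem.Dict.getD, h0]

theorem pvStepA_true (sx sy rx ry : Int) (d : PySem.Dict String Int) (c : Char) :
    pvStepA (true, sx, sy, rx, ry, d) c
      = (false, (pvMove (sx, sy) c).1, (pvMove (sx, sy) c).2, rx, ry,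
          pvUpd d (pvKey (pvMove (sx, sy) c))) := by
  simp only [pvStepA, if_true, pvMove, pvKey]
  rw [pvUpdA_eq]

theorem pvStepA_false (sx sy rx ry : Int) (d : PySem.Dict String Int) (c : Char) :
    pvStepA (false, sx, sy, rx, ry, d) c
      = (true, sx, sy, (pvMove (rx, ry) c).1, (pvMove (rx, ry) c).2,
          pvUpd d (pvKey (pvMove (rx, ry) c))) := by
  simp only [pvStepA, Bool.false_eq_true, if_false, pvMove, pvKey]
  rw [pvUpdA_eq]

theorem pvLoopA (cs : List Char) : ∀ (sp rp : Int × Int) (d : PySem.Dict String Int),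
    (cs.foldl pvStepA (true, sp.1, sp.2, rp.1, rp.2, d)).2.2.2.2.2
      = (pvG cs sp rp).foldl pvUpd d
  ∧ (cs.foldl pvStepA (false, rp.1, rp.2, sp.1, sp.2, d)).2.2.2.2.2
      = (pvG cs sp rp).foldl pvUpd d := by
  induction cs with
  | nil => intro sp rp d; exact ⟨rfl, rfl⟩
  | cons c cs ih =>
    intro sp rp d
    constructor
    · rw [List.foldl_cons, pvStepA_true]
      simp only [pvG, List.foldl_cons]
      exact (ih rp (pvMove sp c) (pvUpd d (pvKey (pvMove sp c)))).2
    · rw [List.foldl_cons, pvStepA_false]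
      simp only [pvG, List.foldl_cons]
      exact (ih rp (pvMove sp c) (pvUpd d (pvKey (pvMove sp c)))).1

theorem pvMoveB_eq (p : Int × Int) (c : Char) :
    ((p.1 + (pvDeltas.getD c (0, 0)).1, p.2 + (pvDeltas.getD c (0, 0)).2) : Int × Int) = pvMove p c := by
  have h : pvDeltas = PySem.Dict.mk [('^', (0, 1)), ('v', (0, -1)), ('>', (1, 0)), ('<', (-1, 0))] := rfl
  unfold pvMove; rw [h]
  simp [PySem.Dict.getD, PySem.Dict.get?_mk_cons]
  split_ifs with h1 h2 h3 h4 <;> simp_all [eq_comm, PySem.Dict.get?] <;> omega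

theorem pvStepB_eq (st : Int × Int × List String) (c : Char) :
    pvStepB st c = ((pvMove (st.1, st.2.1) c).1, (pvMove (st.1, st.2.1) c).2,
      st.2.2 ++ [pvKey (pvMove (st.1, st.2.1) c)]) := by
  have hm := pvMoveB_eq (st.1, st.2.1) c
  simp only [pvStepB, pvKey]
  rw [← hm]

theorem pvWalkB_aux (cs : List Char) : ∀ (p : Int × Int) (acc : List String),
    (cs.foldl pvStepB (p.1, p.2, acc)).2.2 = acc ++ pvWalkFrom p cs := by
  induction cs with
  | nil => intro p acc; simp [pvWalkFrom]
  | cons c cs ih =>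
    intro p acc
    rw [List.foldl_cons, pvStepB_eq]
    rw [ih (pvMove (p.1, p.2) c) (acc ++ [pvKey (pvMove (p.1, p.2) c)])]
    simp [pvWalkFrom]

theorem pvFilterMap_evens {α : Type} (xs : List α) :
    List.filterMap (fun k => xs[2 * k]?) (List.range ((xs.length + 1) / 2)) = pvEvens xs := by
  induction xs using pvEvens.induct with
  | case1 => simp [pvEvens]
  | case2 x => simp [pvEvens]
  | case3 x y rest ih =>
    have hlen : (((x :: y :: rest).length + 1) / 2) = (rest.length + 1) / 2 + 1 := by
      simp [List.length_cons]; omega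
    rw [hlen, List.range_succ_eq_map, List.filterMap_cons, List.filterMap_map]
    have h0 : (x :: y :: rest)[2 * 0]? = some x := by simp
    rw [h0]
    simp only [pvEvens]
    congr 1

theorem pvSlice2_zero {α : Type} (xs : List α) :
    PySem.List.slice? xs (some 0) none 2 = some (pvEvens xs) := by
  unfold PySem.List.slice? PySem.List.sliceIndices
  norm_num
  have hcount : (if 0 < xs.length then (((xs.length : Int) + 2 - 1) / 2).toNat else 0)
      = (xs.length + 1) / 2 := by
    split_ifs with h <;> omega
  rw [hcount, ← pvFilterMap_evens xs]
  apply List.filterMap_congr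
  intro k _
  have h2 : ((2 * (k : Int)).toNat) = 2 * k := by omega
  rw [h2]

theorem pvSlice2_one {α : Type} (xs : List α) :
    PySem.List.slice? xs (some 1) none 2 = some (pvEvens xs.tail) := by
  cases xs with
  | nil => rfl
  | cons x t =>
    unfold PySem.List.slice? PySem.List.sliceIndices
    norm_num
    have hcount : (if 0 < t.length then (((t.length : Int) + 2 - 1) / 2).toNat else 0)
        = (t.length + 1) / 2 := by
      split_ifs with h <;> omega
    rw [hcount, ← pvFilterMap_evens t]
    apply List.filterMap_congr
    intro k _
    have h2 : ((1 + 2 * (k : Int)).toNat) = 2 * k + 1 := by omega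
    rw [h2]
    simp

theorem pvG_eq_ilv (cs : List Char) : ∀ (p q : Int × Int),
    pvG cs p q = pvIlv (pvWalkFrom p (pvEvens cs)) (pvWalkFrom q (pvEvens cs.tail)) := by
  induction cs using pvEvens.induct with
  | case1 => intro p q; rfl
  | case2 c => intro p q; rfl
  | case3 c c' rest ih =>
    intro p q
    simp only [pvG, pvEvens_cons, List.tail_cons, pvWalkFrom, pvIlv]
    rw [ih]

theorem pvLen_walkFrom (cs : List Char) : ∀ p, (pvWalkFrom p cs).length = cs.length := by
  induction cs with
  | nil => intro p; rfl
  | cons c cs ih => intro p; simp [pvWalkFrom, ih]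

theorem pvLen_evens {α : Type} (cs : List α) :
    (pvEvens cs.tail).length ≤ (pvEvens cs).length ∧
    (pvEvens cs).length ≤ (pvEvens cs.tail).length + 1 := by
  induction cs using pvEvens.induct with
  | case1 => simp [pvEvens]
  | case2 x => simp [pvEvens]
  | case3 x y rest ih =>
    simp only [List.tail_cons, pvEvens_cons, pvEvens, List.length_cons]
    omega

theorem pvZipFold (s : List String) : ∀ (r : List String) (d : PySem.Dict String Int),
    r.length ≤ s.length → s.length ≤ r.length + 1 →
    (let c1 := (s.zip r).foldl pvCountPair d
     if r.length < s.length then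
        match PySem.List.pyGet? s (-1) with
        | some k => c1.insert k (c1.getD k 0 + 1)
        | none => c1
      else c1)
    = (pvIlv s r).foldl pvUpd d := by
  induction s with
  | nil =>
    intro r d h1 h2
    have hr : r = [] := by cases r with | nil => rfl | cons b t => simp at h1
    subst hr
    simp [pvIlv]
  | cons a s ih =>
    intro r d h1 h2
    cases r with
    | nil =>
      have hs : s = [] := by cases s with | nil => rfl | cons b t => simp at h2
      subst hs
      simp only [List.zip_nil_right, List.foldl_nil, List.length_nil, List.length_cons,
        PySem.List.pyGet?_neg_one]
      norm_num
      rfl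
    | cons b r =>
      have hlen1 : r.length ≤ s.length := by simp at h1; omega
      have hlen2 : s.length ≤ r.length + 1 := by simp at h2; omega
      simp only [List.zip_cons_cons, List.foldl_cons, pvIlv]
      have hstep := ih r (pvUpd (pvUpd d a) b) hlen1 hlen2
      simp only [pvUpd, pvCountPair] at hstep ⊢
      rw [← hstep]
      by_cases hc : r.length < s.length
      · have hs : s ≠ [] := by cases s with | nil => simp at hc | cons u v => simp
        have hlast : (a :: s).getLast? = s.getLast? := by
          cases s with
          | nil => exact absurd rfl hs
          | cons u v => simp [List.getLast?_cons_cons]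
        rw [PySem.List.pyGet?_neg_one, PySem.List.pyGet?_neg_one, hlast]
        simp [hc]
      · simp [hc]

-- ===== VERDICT (by name: the statement is the Claim_ definition above) =====
theorem deliverPresents2_spec : Claim_equal_deliverPresents2 := by
  unfold Claim_equal_deliverPresents2
  intro data _
  unfold Spec_deliverPresents2 deliverPresents2 deliverPresents2_alt
  have h0 : PySem.Str.slice? data (some 0) none 2
      = some (String.ofList (pvEvens data.toList)) := by
    simp [PySem.Str.slice?, PySem.Chars.slice?_eq_listSlice?, pvSlice2_zero]
  have h1 : PySem.Str.slice? data (some 1) none 2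
      = some (String.ofList (pvEvens data.toList.tail)) := by
    simp [PySem.Str.slice?, PySem.Chars.slice?_eq_listSlice?, pvSlice2_one]
  rw [h0, h1]
  have hS : pvWalkB (String.ofList (pvEvens data.toList))
      = pvWalkFrom (0, 0) (pvEvens data.toList) := by
    unfold pvWalkB
    simpa using pvWalkB_aux (pvEvens data.toList) (0, 0) []
  have hR : pvWalkB (String.ofList (pvEvens data.toList.tail))
      = pvWalkFrom (0, 0) (pvEvens data.toList.tail) := by
    unfold pvWalkB
    simpa using pvWalkB_aux (pvEvens data.toList.tail) (0, 0) []
  simp only [hS, hR]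
  have hA := (pvLoopA data.toList (0, 0) (0, 0) (PySem.Dict.ofList [("0,0", 1)])).1
  simp only [hA, pvG_eq_ilv]
  have hl1 : (pvWalkFrom (0, 0) (pvEvens data.toList.tail)).length
      ≤ (pvWalkFrom (0, 0) (pvEvens data.toList)).length := by
    rw [pvLen_walkFrom, pvLen_walkFrom]; exact (pvLen_evens data.toList).1
  have hl2 : (pvWalkFrom (0, 0) (pvEvens data.toList)).length
      ≤ (pvWalkFrom (0, 0) (pvEvens data.toList.tail)).length + 1 := by
    rw [pvLen_walkFrom, pvLen_walkFrom]; exact (pvLen_evens data.toList).2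
  have hz := pvZipFold (pvWalkFrom (0, 0) (pvEvens data.toList))
    (pvWalkFrom (0, 0) (pvEvens data.toList.tail))
    (PySem.Dict.ofList [("0,0", 1)]) hl1 hl2
  simp only [] at hz
  rw [← hz]
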